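-- pv_equiv track=rewrite | github.com/kevinluk1/Atoi | atoi.py | helper_find_decimal_index
-- ===== SOURCE A (Python) =====
-- def helper_find_decimal_index(num_str):
--     """Function 1 helper method"""
--     dec_location = 1
--     counter = 0
--
--     for i in range(len(num_str)):
--         if num_str[i] == '.':
--             counter += 1
--             dec_location = i
--     if counter > 1:
--         return -2
--     if counter == 0:
--         return -1
--     else:
--         return dec_location + 1
-- ===== SOURCE B (Python) =====
-- def helper_find_decimal_index(num_str):
--     """Function 1 helper method"""
--     first = num_str.find('.')
--     if first == -1:
--         return -1
--     if num_str.find('.', first + 1) != -1: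
--         return -2
--     return first + 1
-- ===== Notes on version B (the rewrite author's own statement) =====
-- stated objective: faster
-- what changed: Replaces the character-by-character index loop that maintains a running dot counter and last-dot index with two str.find calls (first dot, then a search for a second dot after it) and early returns.
import Mathlib
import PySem

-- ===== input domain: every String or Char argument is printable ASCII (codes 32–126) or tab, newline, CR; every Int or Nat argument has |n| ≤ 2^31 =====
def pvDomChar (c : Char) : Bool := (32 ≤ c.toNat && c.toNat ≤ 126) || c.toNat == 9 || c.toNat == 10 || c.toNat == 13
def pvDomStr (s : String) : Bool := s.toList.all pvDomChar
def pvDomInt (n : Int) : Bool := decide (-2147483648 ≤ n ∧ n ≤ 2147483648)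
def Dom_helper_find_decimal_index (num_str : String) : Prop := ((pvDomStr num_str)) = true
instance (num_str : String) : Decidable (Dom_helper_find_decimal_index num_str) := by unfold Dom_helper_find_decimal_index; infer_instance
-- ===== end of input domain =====

-- B replaces A's per-character index loop (running dot counter + last-dot index) with two str.find calls and early returns (measured faster in a timing run).


-- ===== PORT A =====
-- for i in range(len(num_str)): if num_str[i] == '.': counter += 1; dec_location = i
-- (i is always in range, so num_str[i] is cs[i]?; state is (dec_location, counter))
def helper_find_decimal_index (num_str : String) : Int :=
  let cs := num_str.toList
  let st := (List.range cs.length).foldl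
    (fun (st : Int × Int) (i : Nat) =>
      if cs[i]? = some '.' then ((i : Int), st.2 + 1) else st)
    (1, 0)
  if st.2 > 1 then -2
  else if st.2 = 0 then -1
  else st.1 + 1

-- ===== PORT B =====
def helper_find_decimal_index_alt (num_str : String) : Int :=
  let first := PySem.Str.find num_str "."
  if first = -1 then -1
  else if PySem.Str.findFrom num_str "." (first + 1) none ≠ -1 then -2
  else first + 1

-- ===== PRECONDITION & SPEC =====
def Spec_helper_find_decimal_index (num_str : String) (out : Int) : Prop := out = helper_find_decimal_index_alt num_str
instance (num_str : String) (out : Int) : Decidable (Spec_helper_find_decimal_index num_str out) := by unfold Spec_helper_find_decimal_index; infer_instance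

-- ===== CLAIM (what is proved, stated in full; the proofs are below) =====
def Claim_equal_helper_find_decimal_index : Prop := ∀ (num_str : String), Dom_helper_find_decimal_index num_str → Spec_helper_find_decimal_index num_str (helper_find_decimal_index num_str)

-- ===== LEMMAS AND PROOFS =====

-- the loop body of port A, expressed on (char, index) pairs
def pvStep (st : Int × Int) (p : Char × Nat) : Int × Int :=
  if p.1 = '.' then ((p.2 : Int), st.2 + 1) else st

-- A's fold over indices is the same fold over zipIdx
theorem pv_fold_range_eq_zipIdx (l : List Char) (init : Int × Int) :
    (List.range l.length).foldl
      (fun (st : Int × Int) (i : Nat) => if l[i]? = some '.' then ((i : Int), st.2 + 1) else st) init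
    = (l.zipIdx).foldl pvStep init := by
  induction l using List.reverseRecOn with
  | nil => simp
  | append_singleton l a ih =>
    rw [List.length_append, List.length_singleton, List.range_succ, List.foldl_append,
        List.zipIdx_append, List.foldl_append]
    have hcongr : (List.range l.length).foldl
        (fun (st : Int × Int) (i : Nat) => if (l ++ [a])[i]? = some '.' then ((i : Int), st.2 + 1) else st) init
        = (List.range l.length).foldl
        (fun (st : Int × Int) (i : Nat) => if l[i]? = some '.' then ((i : Int), st.2 + 1) else st) init := by
      apply PySem.List.foldl_congr_mem
      intro acc i hi
      rw [List.mem_range] at hi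
      rw [List.getElem?_append_left hi]
    rw [hcongr, ih]
    simp [pvStep, List.zipIdx_cons]

theorem pv_fold_no_dot (l : List Char) : ∀ (k : Nat) (init : Int × Int),
    l.count '.' = 0 → (l.zipIdx k).foldl pvStep init = init := by
  induction l with
  | nil => intro k init h; simp
  | cons a l ih =>
    intro k init h
    rw [List.count_cons] at h
    have ha : ¬ (a = '.') := by
      intro hh; simp [hh] at h
    have hl : l.count '.' = 0 := by
      by_cases hc : (a == '.') = true <;> simp [hc] at h <;> omega
    rw [List.zipIdx_cons, List.foldl_cons]
    simp only [pvStep, ha, reduceIte]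
    exact ih (k+1) init hl

theorem pv_fold_snd (l : List Char) : ∀ (k : Nat) (init : Int × Int),
    ((l.zipIdx k).foldl pvStep init).2 = init.2 + (l.count '.' : Int) := by
  induction l with
  | nil => intro k init; simp
  | cons a l ih =>
    intro k init
    rw [List.zipIdx_cons, List.foldl_cons, List.count_cons]
    by_cases ha : a = '.'
    · simp only [pvStep, ha, beq_self_eq_true, if_true]
      rw [ih]
      push_cast
      ring
    · have : (a == '.') = false := by simp [ha]
      simp only [pvStep, ha, reduceIte, this]
      rw [ih]
      push_cast
      ring

theorem pv_fold_one_dot (l : List Char) : ∀ (k : Nat) (init : Int × Int),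
    l.count '.' = 1 →
    ((l.zipIdx k).foldl pvStep init).1 = (k : Int) + (l.idxOf '.' : Int) := by
  induction l with
  | nil => intro k init h; simp at h
  | cons a l ih =>
    intro k init h
    rw [List.count_cons] at h
    rw [List.zipIdx_cons, List.foldl_cons]
    by_cases ha : a = '.'
    · have hl : l.count '.' = 0 := by simp [ha] at h; omega
      simp only [pvStep, ha, reduceIte]
      rw [pv_fold_no_dot l (k+1) _ hl]
      simp
    · have hl : l.count '.' = 1 := by simp [ha] at h; omega
      simp only [pvStep, ha, reduceIte]
      rw [ih (k+1) init hl, List.idxOf_cons]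
      have : (a == '.') = false := by simp [ha]
      simp only [this, cond_false]
      push_cast
      ring

theorem pv_singleton_infix (c : Char) (l : List Char) : [c] <:+: l ↔ c ∈ l := by
  constructor
  · intro h
    exact List.singleton_sublist.mp h.sublist
  · intro h
    obtain ⟨s, t, rfl⟩ := List.append_of_mem h
    exact ⟨s, t, by simp⟩

theorem pv_find_eq_idxOf (l : List Char) (h : '.' ∈ l) :
    PySem.Chars.find l ['.'] = (l.idxOf '.' : Int) := by
  have hinf : ['.'] <:+: l := (pv_singleton_infix '.' l).mpr h
  have hnn : 0 ≤ PySem.Chars.find l ['.'] := (PySem.Chars.find_nonneg_iff l ['.']).mpr hinf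
  obtain ⟨hpre, hmin⟩ := PySem.Chars.find_spec hnn
  set j := (PySem.Chars.find l ['.']).toNat with hj
  obtain ⟨t, ht⟩ := hpre
  have hlen : (List.drop j l).length = 1 + t.length := by
    rw [← ht]; simp [Nat.add_comm]
  have hjlt : j < l.length := by
    rw [List.length_drop] at hlen; omega
  have hgj : l[j]'hjlt = '.' := by
    have h0 : (['.'] ++ t)[0]? = some '.' := rfl
    rw [ht, List.getElem?_drop, Nat.add_zero, List.getElem?_eq_getElem hjlt] at h0
    exact Option.some_injective _ h0
  have hle : l.idxOf '.' ≤ j := by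
    have hlen2 : j < (List.take (j+1) l).length := by
      simp only [List.length_take]; omega
    have hmem : '.' ∈ List.take (j+1) l := by
      have hm := List.getElem_mem hlen2
      rw [List.getElem_take] at hm
      rwa [hgj] at hm
    have := (List.mem_take_iff_idxOf_lt h).mp hmem
    omega
  have hge : j ≤ l.idxOf '.' := by
    by_contra hlt
    push Not at hlt
    refine hmin (l.idxOf '.') hlt ⟨List.drop (l.idxOf '.' + 1) l, ?_⟩
    have hidx : l.idxOf '.' < l.length := List.idxOf_lt_length_of_mem h
    rw [List.drop_eq_getElem_cons hidx, List.getElem_idxOf hidx]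
    rfl
  have : l.idxOf '.' = j := le_antisymm hle hge
  omega

theorem pv_count_drop (l : List Char) (h : '.' ∈ l) :
    (l.drop (l.idxOf '.' + 1)).count '.' = l.count '.' - 1 := by
  have hidx : l.idxOf '.' < l.length := List.idxOf_lt_length_of_mem h
  have hsplit : l = List.take (l.idxOf '.') l ++ ('.' :: List.drop (l.idxOf '.' + 1) l) := by
    conv_lhs => rw [← List.take_append_drop (l.idxOf '.') l]
    rw [List.drop_eq_getElem_cons hidx, List.getElem_idxOf hidx]
  have htake : (List.take (l.idxOf '.') l).count '.' = 0 := by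
    rw [List.count_eq_zero]
    intro hmem
    have := (List.mem_take_iff_idxOf_lt h).mp hmem
    omega
  conv_rhs => rw [hsplit]
  rw [List.count_append, List.count_cons, htake]
  simp

-- ===== VERDICT (by name: the statement is the Claim_ definition above) =====
theorem helper_find_decimal_index_spec : Claim_equal_helper_find_decimal_index := by
  intro num_str _
  unfold Spec_helper_find_decimal_index helper_find_decimal_index helper_find_decimal_index_alt
  simp only [PySem.Str.find_eq, PySem.Str.findFrom_eq]
  have hdot : (".").toList = ['.'] := rfl
  rw [hdot]
  set cs := num_str.toList with hcs
  rw [pv_fold_range_eq_zipIdx]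
  rcases hc : cs.count '.' with _ | n
  · -- no dot
    have hmem : '.' ∉ cs := List.count_eq_zero.mp hc
    have hfind : PySem.Chars.find cs ['.'] = -1 :=
      (PySem.Chars.find_eq_neg_one_iff cs ['.']).mpr
        (fun hinf => hmem ((pv_singleton_infix '.' cs).mp hinf))
    rw [pv_fold_no_dot cs 0 (1, 0) hc, hfind]
    norm_num
  · -- at least one dot
    have hmem : '.' ∈ cs := List.count_pos_iff.mp (by omega)
    have hidx : cs.idxOf '.' < cs.length := List.idxOf_lt_length_of_mem hmem
    have hfind : PySem.Chars.find cs ['.'] = (cs.idxOf '.' : Int) := pv_find_eq_idxOf cs hmem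
    have hsnd : ((cs.zipIdx 0).foldl pvStep (1, 0)).2 = ((n : Int) + 1) := by
      rw [pv_fold_snd cs 0 (1, 0), hc]
      push_cast
      ring
    have hdropc : (cs.drop (cs.idxOf '.' + 1)).count '.' = n := by
      rw [pv_count_drop cs hmem, hc]
      omega
    have hcast : (cs.idxOf '.' : Int) + 1 = ((cs.idxOf '.' + 1 : Nat) : Int) := by push_cast; ring
    have hff := PySem.Chars.findFrom_natCast_eq_neg_one_iff cs ['.'] (cs.idxOf '.' + 1) (by omega)
    rcases Nat.eq_zero_or_pos n with hn | hn
    · -- exactly one dot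
      subst hn
      have hnomem : '.' ∉ cs.drop (cs.idxOf '.' + 1) := List.count_eq_zero.mp hdropc
      have hffe : PySem.Chars.findFrom cs ['.'] ((cs.idxOf '.' + 1 : Nat) : Int) none = -1 :=
        hff.mpr (fun hinf => hnomem ((pv_singleton_infix '.' _).mp hinf))
      have hfst : ((cs.zipIdx 0).foldl pvStep (1, 0)).1 = ((0 : Nat) : Int) + (cs.idxOf '.' : Int) :=
        pv_fold_one_dot cs 0 (1, 0) hc
      rw [hsnd, hfind, hcast, hffe]
      have hne : ¬ ((cs.idxOf '.' : Int) = -1) := by omega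
      norm_num [hne]
      rw [hfst]
      norm_num
    · -- two or more dots
      have hmem2 : '.' ∈ cs.drop (cs.idxOf '.' + 1) := List.count_pos_iff.mp (by omega)
      have hffe : PySem.Chars.findFrom cs ['.'] ((cs.idxOf '.' + 1 : Nat) : Int) none ≠ -1 := by
        intro he
        exact (hff.mp he) ((pv_singleton_infix '.' _).mpr hmem2)
      rw [hsnd, hfind, hcast]
      have h1 : ((n : Int) + 1 > 1) := by omega
      have hne : ¬ ((cs.idxOf '.' : Int) = -1) := by omega
      rw [if_pos h1, if_neg hne, if_pos hffe]
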